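-- pv_equiv track=rewrite | github.com/ann-w/state-representations-llms-dynamic-tasks | smartplay/libs/smartplay/src/smartplay/hanoi/state_representations.py | from_internal_state
-- ===== SOURCE A (Python) =====
-- from typing import List, Dict, Tuple, Any, Optional, Union
--
-- def from_internal_state(
--     internal_state: Tuple[int, ...], num_disks: int
-- ) -> str:
--     # 1. gather disks on each peg
--     pegs = {0: [], 1: [], 2: []}
--     for disk in range(num_disks):
--         pegs[internal_state[disk]].append(disk)
--
--     # 2. bottom-to-top ordering (largest-ID at index 1)
--     #    pegs[i] is already bottom->top because disks are numbered
--     #    small ID = small disk; if you invert that rule, sort reverse.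
--     def to_lua_list(lst):
--         return "{" + ", ".join(map(str, lst[::-1])) + "}"  # top → right
--
--     lua_table = (
--         "function get_state()\n"
--         "  return {\n"
--         f"    A = {to_lua_list(pegs[0])},\n"
--         f"    B = {to_lua_list(pegs[1])},\n"
--         f"    C = {to_lua_list(pegs[2])}\n"
--         "  }\n"
--         "end"
--     )
--     return lua_table
-- ===== SOURCE B (Python) =====
-- def from_internal_state(internal_state, num_disks):
--     def peg_lua(p):
--         disks = [str(d) for d in range(num_disks - 1, -1, -1) if internal_state[d] == p]
--         return "{" + ", ".join(disks) + "}"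
--     return (
--         "function get_state()\n"
--         "  return {\n"
--         f"    A = {peg_lua(0)},\n"
--         f"    B = {peg_lua(1)},\n"
--         f"    C = {peg_lua(2)}\n"
--         "  }\n"
--         "end"
--     )
-- ===== Notes on version B (the rewrite author's own statement) =====
-- stated objective: alternative
-- what changed: Replaces A's single ascending pass that buckets disks into a dict of three lists (each reversed at format time) by three independent descending filter scans, one per peg, producing each top-to-bottom list directly with no dict and no reversal.
import Mathlib
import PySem

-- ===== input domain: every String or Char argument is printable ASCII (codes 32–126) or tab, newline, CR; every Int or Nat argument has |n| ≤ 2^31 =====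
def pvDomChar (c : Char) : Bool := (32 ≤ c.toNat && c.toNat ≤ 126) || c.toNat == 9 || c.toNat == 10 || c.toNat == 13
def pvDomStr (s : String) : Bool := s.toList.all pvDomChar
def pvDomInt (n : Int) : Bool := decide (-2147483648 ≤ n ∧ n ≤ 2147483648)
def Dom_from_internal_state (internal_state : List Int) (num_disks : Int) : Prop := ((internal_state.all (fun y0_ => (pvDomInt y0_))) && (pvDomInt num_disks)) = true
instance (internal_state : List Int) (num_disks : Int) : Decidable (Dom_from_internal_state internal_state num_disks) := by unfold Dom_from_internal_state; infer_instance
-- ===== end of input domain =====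

-- B replaces A's single bucketing pass through a dict by three independent descending
-- filter scans (one per peg), which need no dict and no final reversal (objective: alternative).

-- ===== PORT A =====
-- to_lua_list(lst): "{" + ", ".join(map(str, lst[::-1])) + "}"   (lst[::-1] via PySem.List.slice?, step -1 ≠ 0)
def pvToLuaList (lst : List Int) : String :=
  "{" ++ PySem.Str.join ", " (((PySem.List.slice? lst none none (-1)).getD []).map PySem.Int.toStr) ++ "}"

def from_internal_state (internal_state : List Int) (num_disks : Int) : String :=
  let pegs : PySem.Dict Int (List Int) :=
    (PySem.List.pyRange 0 num_disks 1).foldl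
      (fun pegs disk =>
        -- pegs[internal_state[disk]].append(disk); IndexError/KeyError are excluded by Pre_
        pegs.modify ((PySem.List.pyGet? internal_state disk).getD 0) [] (· ++ [disk]))
      (PySem.Dict.ofList [(0, []), (1, []), (2, [])])
  "function get_state()\n  return {\n    A = " ++ pvToLuaList (pegs.getD 0 []) ++
  ",\n    B = " ++ pvToLuaList (pegs.getD 1 []) ++
  ",\n    C = " ++ pvToLuaList (pegs.getD 2 []) ++ "\n  }\nend"

-- ===== PORT B =====
-- peg_lua(p): disks on peg p, scanned top→bottom (range(num_disks-1, -1, -1)), formatted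
def pvPegLua (internal_state : List Int) (num_disks : Int) (p : Int) : String :=
  let disks := ((PySem.List.pyRange (num_disks - 1) (-1) (-1)).filter
      (fun d => (PySem.List.pyGet? internal_state d).getD 0 == p)).map PySem.Int.toStr
  "{" ++ PySem.Str.join ", " disks ++ "}"

def from_internal_state_alt (internal_state : List Int) (num_disks : Int) : String :=
  "function get_state()\n  return {\n    A = " ++ pvPegLua internal_state num_disks 0 ++
  ",\n    B = " ++ pvPegLua internal_state num_disks 1 ++
  ",\n    C = " ++ pvPegLua internal_state num_disks 2 ++ "\n  }\nend"

-- ===== PRECONDITION & SPEC =====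
-- Pre_ excludes exactly the inputs where Python A raises: an IndexError (num_disks exceeds
-- the length of internal_state) or a KeyError (a consulted peg value outside {0, 1, 2}).
def Pre_from_internal_state (internal_state : List Int) (num_disks : Int) : Prop :=
  (0 < num_disks → num_disks ≤ internal_state.length) ∧
  ∀ x ∈ internal_state.take num_disks.toNat, x = 0 ∨ x = 1 ∨ x = 2
instance (internal_state : List Int) (num_disks : Int) : Decidable (Pre_from_internal_state internal_state num_disks) := by unfold Pre_from_internal_state; infer_instance

def pvWitness_from_internal_state : List Int × Int := ([0, 1, 2, 0, 1], 5)

def Spec_from_internal_state (internal_state : List Int) (num_disks : Int) (out : String) : Prop := out = from_internal_state_alt internal_state num_disks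
instance (internal_state : List Int) (num_disks : Int) (out : String) : Decidable (Spec_from_internal_state internal_state num_disks out) := by unfold Spec_from_internal_state; infer_instance

-- ===== CLAIM (what is proved, stated in full; the proofs are below) =====
def Claim_equal_from_internal_state : Prop := ∀ (internal_state : List Int) (num_disks : Int), Dom_from_internal_state internal_state num_disks → Pre_from_internal_state internal_state num_disks → Spec_from_internal_state internal_state num_disks (from_internal_state internal_state num_disks)


-- ===== LEMMAS AND PROOFS =====

-- A's bucket for peg p, before the reversal, is the ascending filter of the disk range.
theorem pv_bucket_eq (internal_state : List Int) (num_disks p : Int) :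
    (((PySem.List.pyRange 0 num_disks 1).foldl
      (fun pegs disk =>
        pegs.modify ((PySem.List.pyGet? internal_state disk).getD 0) [] (· ++ [disk]))
      (PySem.Dict.ofList [(0, []), (1, []), (2, [])])).getD p []
    = PySem.Dict.getD (PySem.Dict.ofList [(0, ([] : List Int)), (1, []), (2, [])]) p [] ++
      (PySem.List.pyRange 0 num_disks 1).filter
        (fun d => (PySem.List.pyGet? internal_state d).getD 0 == p)) := by
  have h := PySem.Dict.getD_foldl_modify_append
    ((PySem.List.pyRange 0 num_disks 1).map
      (fun d => ((PySem.List.pyGet? internal_state d).getD 0, d)))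
    (PySem.Dict.ofList [(0, ([] : List Int)), (1, []), (2, [])]) p
  rw [List.foldl_map] at h
  rw [h, List.filter_map, List.map_map]
  simp [Function.comp_def]

-- B's descending filter is the reverse of A's ascending filter.
theorem pv_desc_filter (num_disks : Int) (q : Int → Bool) :
    (PySem.List.pyRange (num_disks - 1) (-1) (-1)).filter q
    = ((PySem.List.pyRange 0 num_disks 1).filter q).reverse := by
  have h : PySem.List.pyRange (num_disks - 1) (-1) (-1)
      = (PySem.List.pyRange 0 num_disks 1).reverse := by
    rw [PySem.List.pyRange_neg_one_eq_reverse]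
    norm_num
  rw [h, List.filter_reverse]

theorem pv_peg_eq (internal_state : List Int) (num_disks p : Int)
    (hp : p = 0 ∨ p = 1 ∨ p = 2) :
    pvToLuaList
      (((PySem.List.pyRange 0 num_disks 1).foldl
        (fun pegs disk =>
          pegs.modify ((PySem.List.pyGet? internal_state disk).getD 0) [] (· ++ [disk]))
        (PySem.Dict.ofList [(0, []), (1, []), (2, [])])).getD p [])
    = pvPegLua internal_state num_disks p := by
  rw [pv_bucket_eq]
  have h0 : PySem.Dict.getD (PySem.Dict.ofList [(0, ([] : List Int)), (1, []), (2, [])]) p []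
      = [] := by
    rcases hp with rfl | rfl | rfl <;> rfl
  rw [h0, List.nil_append]
  unfold pvToLuaList pvPegLua
  rw [PySem.List.slice?_none_none_neg_one, pv_desc_filter]
  rfl

-- ===== VERDICT (by name: the statement is the Claim_ definition above) =====
theorem from_internal_state_spec : Claim_equal_from_internal_state := by
  intro internal_state num_disks _ _
  unfold Spec_from_internal_state from_internal_state from_internal_state_alt
  simp only [pv_peg_eq internal_state num_disks 0 (by left; rfl),
    pv_peg_eq internal_state num_disks 1 (by right; left; rfl),
    pv_peg_eq internal_state num_disks 2 (by right; right; rfl)]
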